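/- GENERATED by mk_final_copies.py from the proof of the farm's unit `start_decoder.F3` (farm:start_decoder.F3.1: Proof.lean) as the
   re-elaboration sweep compiled it — do not edit. -/
import Asan.CheckWalk
import Vorbis.Spec.Units.start_decoder_F3
import Vorbis.Spec.Worked.start_decoder_F3_Lemmas

/-
  Unit start_decoder.F3 (0x11532b – 0x115450; stb_vorbis_fixed.c 3970 – 3979): a floor of type 0 — seven fields and the book list are
  parsed into the floor element `g(i)`, then `error(f, VORBIS_feature_not_supported)` and the jump to the epilogue.

  ONE LEMMA PER RETURNED CALLEE STATE (the cut points `cut195 … cut203` are the returns of the eight `get_bits` and of `error`): each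
  walks from the assertion `In3` (Lemmas.lean: the point `Pt` + rsp, rbp = f, r12 = g(i)) at one cut to `In3` at the next; the
  pure lemma `Pt.carry` takes the point over the callee's footprint and the store into the floor element. Loop 3977 (head `cut201`)
  is closed by `ReachVia.loop` with the measure `256 − j` (`j < number_of_books ≤ 255`, a byte).
-/
namespace Vorbis.Spec.start_decoder_F3
open X86 X86.User Asan Vorbis Vorbis.Spec Vorbis.Spec.StartDecoder

set_option maxRecDepth 4000
set_option maxHeartbeats 4000000

/-- **Step 0** (cut194 = the segment's entry 0x11532b → cut195): the checked load of `f->floor_config` (0x115332,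
stb_vorbis_fixed.c:3970), `g = &f->floor_config[i]` into r12 (`elem_addr`), `get_bits(f, 8)` (0x115352). The two loads (`i` from the
dword `[R + 18H]`, `floor_config` from `[f + 138H]`) are given as facts before the walk. -/
theorem step0 (Lay : Layout) (hLay : Lay.hi = 0x1000000) (μ : Microarch) (hμ : UserX.MicroOK μ) (u₀ : State)
    (hcode : HasCodeNat Lay u₀ Vorbis.L.start_decoder.entry Vorbis.Code.code_start_decoder.nat Vorbis.L.start_decoder.size)
    (hload8 : Asan.SmallCheck Lay μ Vorbis.WayInv (Vorbis.CodeOK u₀) [.rax, .rcx, .rdx] 8 Vorbis.L.__asan_load8_noabort.entry)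
    (h_get_bits : ∀ (others : List Obj) (frames : List (Nat × FrameLayout)) (Blk : Block → Prop) (len : Nat),
      Calls Lay μ Vorbis.WayInv (Vorbis.conv u₀) Vorbis.L.get_bits.entry (Vorbis.Spec.get_bits.spec others frames Blk len))
    (g : Ghost) (i : Nat) (A5 : Arena) (A : Arena × List Obj) (v : State) (hbody : BodyF3 u₀ g i A5 A v) :
    ReachVia Lay μ WayInv v (fun w => ∃ fc n gw, In3 u₀ g i A5 A fc n gw Vorbis.L.start_decoder.cut195 w) := by
  have hgb := h_get_bits A.2 g.frames' (g.Blk A) g.len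
  have hpt := Pt.of_body hbody
  have hfr := hbody.loop.frame
  have hFL1 := hbody.loop.floors.FL1
  have hlt := hbody.lt
  have hcnt : v.mem.u32 (g.R + 0x18) = i := hbody.loop.cnt
  have hcfg : v.mem.u64 (g.f + 312) = stb_vorbis.floor_config v.mem g.f := by
    simp only [vacc, voff]
  generalize stb_vorbis.floor_config v.mem g.f = fc at hpt hcfg
  generalize stb_vorbis.floor_count v.mem g.f = n at hpt hFL1 hlt
  have he := hpt.entry
  v_entry he
  simp only [depth] at he_room he_stack
  obtain ⟨⟨r1, r2, r3, r4⟩, ⟨f1, f2, f3, f4⟩, ⟨c1, c2, c3, c4, c5⟩, c6⟩ := hpt.where_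
  have eRA : g.RA = (g.e.reg .rsp).toNat := rfl
  have ef : g.f = (g.e.reg .rdi).toNat := rfl
  have eR : g.R = (g.e.reg .rsp).toNat - 1480 := rfl
  have b_rip : v.rip = Vorbis.L.start_decoder.cut194 := hfr.rip
  have b_rsp : v.reg .rsp = g.e.reg .rsp - 1480 := by
    rw [hfr.rsp]
    exact hpt.rsp_eq
  have b_rbp : v.reg .rbp = g.e.reg .rdi := by
    rw [hbody.loop.rbp]
    exact addr_toNat _
  have w_eq : Mem.EqOn Vorbis.L.textLo Vorbis.L.textHi u₀.mem v.mem := hfr.code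
  have hdf : v.flags .df = false := (show abiInv _ from hfr.inv).1
  have hmx : v.mxcsr &&& 0x1F80 = 0x1F80 := (show abiInv _ from hfr.inv).2
  have hsse := Vorbis.sseOK_of_abiInv hfr.inv
  u_walk hcode [hμ.vendor] until [Vorbis.L.start_decoder.cut195] span [Vorbis.L.textLo, Vorbis.L.textHi] side (v_side)
  case check_115332 =>
    -- 0x115332: the 8 bytes of `f->floor_config` at `f + 138H`
    clear hcnt hcfg
    have hun : ShadowUntouched v.mem s_115332.mem := by v_untouched
    exact hpt.acc_obj hun _ 8 (by decide) (by u_omega) (by u_omega)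
  case call_inv =>
    v_inv
  case pre_115352 =>
    -- 0x115352: the precondition of `get_bits(f, 8)`
    clear hcnt hcfg
    obtain ⟨gw, hgw⟩ : ∃ gw : Word, gw.toNat = fc + 1596 * i := ⟨addr (fc + 1596 * i), toNat_addr _ (by omega)⟩
    have hun : ShadowUntouched v.mem s_115352.mem := by v_untouched
    have hsame : Mem.SameExcept [⟨(g.e.reg .rsp).toNat - 1488, (g.e.reg .rsp).toNat - 1480⟩, ⟨gw.toNat, gw.toNat + 1596⟩]
        v.mem s_115352.mem := by
      u_same
    have hbits : Bits (g.Blk A) g.len s_115352.mem g.f := by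
      apply hpt.bits_off hsame
      intro w hw
      simp only [List.mem_cons, List.mem_nil_iff, or_false] at hw
      rcases hw with rfl | rfl
      · exact Or.inl ⟨by simp only []; omega, by simp only []; omega⟩
      · exact Or.inr ⟨by simp only []; omega, by simp only []; omega⟩
    refine ⟨hpt.readerPre ?_ hun ?_ hbits, ?_⟩
    · rw [w_rsp]
      u_omega
    · rw [w_rdi]
      exact ef.symm
    · rw [Vorbis.Spec.bitsArg_def, w_rsi]
      decide
  case cont =>
    -- cut195: get_bits returned
    -- the two loads of the address computation
    have ha1 : g.e.reg .rsp - 1456 = addr (g.R + 0x18) := eq_addr _ _ (by u_omega)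
    have hl1 : v.mem.readLE (g.e.reg .rsp - 1456) 4 = i := by
      rw [ha1]
      exact hcnt
    have ha2 : g.e.reg .rdi + 312 = addr (g.f + 312) := eq_addr _ _ (by u_omega)
    have hl2 : v.mem.readLE (g.e.reg .rdi + 312) 8 = fc := by
      rw [ha2]
      exact hcfg
    -- the element's address, as the code computes it
    obtain ⟨gw, hgwdef⟩ : ∃ gw : Word,
        gw = Word.ofBV (BitVec.signExtend 64 (BitVec.ofNat 32 i)) * 1596 + UInt64.ofNat fc := ⟨_, rfl⟩
    have hgw : gw.toNat = fc + 1596 * i := by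
      rw [hgwdef]
      exact elem_addr i fc (by omega) (by omega)
    rw [hl1, hl2, ← hgwdef] at w_r12
    clear hl1 hl2 ha1 ha2 hcnt hcfg hgwdef
    v_after_call w_rsp_115352 w_mem_115352
    simp only [w_rdi_115352] at w_same
    have hpost : GetBitsSpecPost (g.Blk A) g.len (s_115352.reg .rdi).toNat (bitsArg s_115352) s_115352 s_115352r := w_post
    rw [w_rdi_115352] at hpost
    have hsame : Mem.SameExcept
        [⟨(g.e.reg .rsp).toNat - 1840, (g.e.reg .rsp).toNat - 1480⟩, ⟨gw.toNat, gw.toNat + 1596⟩,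
         ⟨(g.e.reg .rdi).toNat + 48, (g.e.reg .rdi).toNat + 56⟩, ⟨(g.e.reg .rdi).toNat + 84, (g.e.reg .rdi).toNat + 96⟩,
         ⟨(g.e.reg .rdi).toNat + 136, (g.e.reg .rdi).toNat + 144⟩, ⟨(g.e.reg .rdi).toNat + 1484, (g.e.reg .rdi).toNat + 1749⟩,
         ⟨(g.e.reg .rdi).toNat + 1752, (g.e.reg .rdi).toNat + 1784⟩] v.mem s_115352r.mem := by
      u_same
    have hun : ShadowUntouched v.mem s_115352r.mem := by v_untouched
    have hpt' : Pt u₀ g i A5 A fc n s_115352r.mem := by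
      apply hpt.carry hsame hun hpost.bits.bits
      intro w hw
      simp only [List.mem_cons, List.mem_nil_iff, or_false] at hw
      rcases hw with rfl | rfl | rfl | rfl | rfl | rfl | rfl
      · exact Or.inl ⟨by simp only []; omega, by simp only []; omega⟩
      · exact Or.inr (Or.inr (Or.inr (Or.inr (Or.inr (Or.inr ⟨by simp only []; omega, by simp only []; omega⟩)))))
      · exact Or.inr (Or.inl ⟨by simp only []; omega, by simp only []; omega⟩)
      · exact Or.inr (Or.inr (Or.inl ⟨by simp only []; omega, by simp only []; omega⟩))
      · exact Or.inr (Or.inr (Or.inr (Or.inl ⟨by simp only []; omega, by simp only []; omega⟩)))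
      · exact Or.inr (Or.inr (Or.inr (Or.inr (Or.inl ⟨by simp only []; omega, by simp only []; omega⟩))))
      · exact Or.inr (Or.inr (Or.inr (Or.inr (Or.inr (Or.inl ⟨by simp only []; omega, by simp only []; omega⟩)))))
    refine ReachVia.done ⟨fc, n, gw, hpt', w_rip, w_rsp, ?_, ?_, hgw, w_eq, w_inv⟩
    · rw [w_kept .rbp rfl]
      exact b_rbp
    · exact w_r12

/-- **Step 1** (cut195 → cut196): the checked store `g->order` (0x11535d, stb_vorbis_fixed.c:3971) of the result of the
previous `get_bits`, then `get_bits(f, 16)` (0x11536e); the point is carried over both by `Pt.carry`. -/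
theorem step1 (Lay : Layout) (hLay : Lay.hi = 0x1000000) (μ : Microarch) (hμ : UserX.MicroOK μ) (u₀ : State)
    (hcode : HasCodeNat Lay u₀ Vorbis.L.start_decoder.entry Vorbis.Code.code_start_decoder.nat Vorbis.L.start_decoder.size)
    (h_get_bits : ∀ (others : List Obj) (frames : List (Nat × FrameLayout)) (Blk : Block → Prop) (len : Nat),
      Calls Lay μ Vorbis.WayInv (Vorbis.conv u₀) Vorbis.L.get_bits.entry (Vorbis.Spec.get_bits.spec others frames Blk len))
    (hstore1 : Asan.SmallCheck Lay μ Vorbis.WayInv (Vorbis.CodeOK u₀) [.rax, .rdx] 1 Vorbis.L.__asan_store1_noabort.entry)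
    (g : Ghost) (i : Nat) (A5 : Arena) (A : Arena × List Obj) (fc : Nat) (n : Int) (gw : Word) (v : State)
    (hat : In3 u₀ g i A5 A fc n gw Vorbis.L.start_decoder.cut195 v) :
    ReachVia Lay μ WayInv v (In3 u₀ g i A5 A fc n gw Vorbis.L.start_decoder.cut196) := by
  have hgb := h_get_bits A.2 g.frames' (g.Blk A) g.len
  have hpt := hat.pt
  have he := hpt.entry
  v_entry he
  simp only [depth] at he_room he_stack
  obtain ⟨⟨r1, r2, r3, r4⟩, ⟨f1, f2, f3, f4⟩, ⟨c1, c2, c3, c4, c5⟩, c6⟩ := hpt.where_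
  have eRA : g.RA = (g.e.reg .rsp).toNat := rfl
  have ef : g.f = (g.e.reg .rdi).toNat := rfl
  have eR : g.R = (g.e.reg .rsp).toNat - 1480 := rfl
  have b_rip := hat.rip
  have b_rsp := hat.rsp
  have b_rbp := hat.rbp
  have b_r12 := hat.r12
  have hgw := hat.elem
  have w_eq : Mem.EqOn Vorbis.L.textLo Vorbis.L.textHi u₀.mem v.mem := hat.code
  have hdf : v.flags .df = false := (show abiInv _ from hat.inv).1
  have hmx : v.mxcsr &&& 0x1F80 = 0x1F80 := (show abiInv _ from hat.inv).2
  have hsse := Vorbis.sseOK_of_abiInv hat.inv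
  u_walk hcode [hμ.vendor] until [Vorbis.L.start_decoder.cut196] span [Vorbis.L.textLo, Vorbis.L.textHi] side (v_side)
  case check_11535d =>
    -- 0x11535d: 1 byte(s) at offset 0 of the floor element
    have hun : ShadowUntouched v.mem s_11535d.mem := by v_untouched
    exact hpt.acc_elem hun _ 1 (by decide) (by u_omega) (by u_omega)
  case call_inv =>
    v_inv
  case pre_11536e =>
    -- 0x11536e: the precondition of `get_bits(f, 16)`
    have hun : ShadowUntouched v.mem s_11536e.mem := by v_untouched
    have hsame : Mem.SameExcept [⟨(g.e.reg .rsp).toNat - 1488, (g.e.reg .rsp).toNat - 1480⟩, ⟨gw.toNat, gw.toNat + 1596⟩]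
        v.mem s_11536e.mem := by
      u_same
    have hbits : Bits (g.Blk A) g.len s_11536e.mem g.f := by
      apply hpt.bits_off hsame
      intro w hw
      simp only [List.mem_cons, List.mem_nil_iff, or_false] at hw
      rcases hw with rfl | rfl
      · exact Or.inl ⟨by simp only []; omega, by simp only []; omega⟩
      · exact Or.inr ⟨by simp only []; omega, by simp only []; omega⟩
    refine ⟨hpt.readerPre ?_ hun ?_ hbits, ?_⟩
    · rw [w_rsp]
      u_omega
    · rw [w_rdi]
      exact ef.symm
    · rw [Vorbis.Spec.bitsArg_def, w_rsi]
      decide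
  case cont =>
    -- cut196: get_bits returned
    v_after_call w_rsp_11536e w_mem_11536e
    simp only [w_rdi_11536e] at w_same
    have hpost : GetBitsSpecPost (g.Blk A) g.len (s_11536e.reg .rdi).toNat (bitsArg s_11536e) s_11536e s_11536er := w_post
    rw [w_rdi_11536e] at hpost
    have hsame : Mem.SameExcept
        [⟨(g.e.reg .rsp).toNat - 1840, (g.e.reg .rsp).toNat - 1480⟩, ⟨gw.toNat, gw.toNat + 1596⟩,
         ⟨(g.e.reg .rdi).toNat + 48, (g.e.reg .rdi).toNat + 56⟩, ⟨(g.e.reg .rdi).toNat + 84, (g.e.reg .rdi).toNat + 96⟩,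
         ⟨(g.e.reg .rdi).toNat + 136, (g.e.reg .rdi).toNat + 144⟩, ⟨(g.e.reg .rdi).toNat + 1484, (g.e.reg .rdi).toNat + 1749⟩,
         ⟨(g.e.reg .rdi).toNat + 1752, (g.e.reg .rdi).toNat + 1784⟩] v.mem s_11536er.mem := by
      u_same
    have hun : ShadowUntouched v.mem s_11536er.mem := by v_untouched
    have hpt' : Pt u₀ g i A5 A fc n s_11536er.mem := by
      apply hpt.carry hsame hun hpost.bits.bits
      intro w hw
      simp only [List.mem_cons, List.mem_nil_iff, or_false] at hw
      rcases hw with rfl | rfl | rfl | rfl | rfl | rfl | rfl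
      · exact Or.inl ⟨by simp only []; omega, by simp only []; omega⟩
      · exact Or.inr (Or.inr (Or.inr (Or.inr (Or.inr (Or.inr ⟨by simp only []; omega, by simp only []; omega⟩)))))
      · exact Or.inr (Or.inl ⟨by simp only []; omega, by simp only []; omega⟩)
      · exact Or.inr (Or.inr (Or.inl ⟨by simp only []; omega, by simp only []; omega⟩))
      · exact Or.inr (Or.inr (Or.inr (Or.inl ⟨by simp only []; omega, by simp only []; omega⟩)))
      · exact Or.inr (Or.inr (Or.inr (Or.inr (Or.inl ⟨by simp only []; omega, by simp only []; omega⟩))))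
      · exact Or.inr (Or.inr (Or.inr (Or.inr (Or.inr (Or.inl ⟨by simp only []; omega, by simp only []; omega⟩)))))
    refine ReachVia.done ?_
    refine ⟨hpt', w_rip, w_rsp, ?_, ?_, hgw, w_eq, w_inv⟩
    · rw [w_kept .rbp rfl]
      exact b_rbp
    · rw [w_kept .r12 rfl]
      exact b_r12

/-- **Step 2** (cut196 → cut197): the checked store `g->rate` (0x11537b, stb_vorbis_fixed.c:3972) of the result of the
previous `get_bits`, then `get_bits(f, 16)` (0x11538e); the point is carried over both by `Pt.carry`. -/
theorem step2 (Lay : Layout) (hLay : Lay.hi = 0x1000000) (μ : Microarch) (hμ : UserX.MicroOK μ) (u₀ : State)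
    (hcode : HasCodeNat Lay u₀ Vorbis.L.start_decoder.entry Vorbis.Code.code_start_decoder.nat Vorbis.L.start_decoder.size)
    (h_get_bits : ∀ (others : List Obj) (frames : List (Nat × FrameLayout)) (Blk : Block → Prop) (len : Nat),
      Calls Lay μ Vorbis.WayInv (Vorbis.conv u₀) Vorbis.L.get_bits.entry (Vorbis.Spec.get_bits.spec others frames Blk len))
    (hstore2 : Asan.SmallCheck Lay μ Vorbis.WayInv (Vorbis.CodeOK u₀) [.rax, .rcx, .rdx] 2 Vorbis.L.__asan_store2_noabort.entry)
    (g : Ghost) (i : Nat) (A5 : Arena) (A : Arena × List Obj) (fc : Nat) (n : Int) (gw : Word) (v : State)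
    (hat : In3 u₀ g i A5 A fc n gw Vorbis.L.start_decoder.cut196 v) :
    ReachVia Lay μ WayInv v (In3 u₀ g i A5 A fc n gw Vorbis.L.start_decoder.cut197) := by
  have hgb := h_get_bits A.2 g.frames' (g.Blk A) g.len
  have hpt := hat.pt
  have he := hpt.entry
  v_entry he
  simp only [depth] at he_room he_stack
  obtain ⟨⟨r1, r2, r3, r4⟩, ⟨f1, f2, f3, f4⟩, ⟨c1, c2, c3, c4, c5⟩, c6⟩ := hpt.where_
  have eRA : g.RA = (g.e.reg .rsp).toNat := rfl
  have ef : g.f = (g.e.reg .rdi).toNat := rfl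
  have eR : g.R = (g.e.reg .rsp).toNat - 1480 := rfl
  have b_rip := hat.rip
  have b_rsp := hat.rsp
  have b_rbp := hat.rbp
  have b_r12 := hat.r12
  have hgw := hat.elem
  have w_eq : Mem.EqOn Vorbis.L.textLo Vorbis.L.textHi u₀.mem v.mem := hat.code
  have hdf : v.flags .df = false := (show abiInv _ from hat.inv).1
  have hmx : v.mxcsr &&& 0x1F80 = 0x1F80 := (show abiInv _ from hat.inv).2
  have hsse := Vorbis.sseOK_of_abiInv hat.inv
  u_walk hcode [hμ.vendor] until [Vorbis.L.start_decoder.cut197] span [Vorbis.L.textLo, Vorbis.L.textHi] side (v_side)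
  case check_11537b =>
    -- 0x11537b: 2 byte(s) at offset 2 of the floor element
    have hun : ShadowUntouched v.mem s_11537b.mem := by v_untouched
    exact hpt.acc_elem hun _ 2 (by decide) (by u_omega) (by u_omega)
  case call_inv =>
    v_inv
  case pre_11538e =>
    -- 0x11538e: the precondition of `get_bits(f, 16)`
    have hun : ShadowUntouched v.mem s_11538e.mem := by v_untouched
    have hsame : Mem.SameExcept [⟨(g.e.reg .rsp).toNat - 1488, (g.e.reg .rsp).toNat - 1480⟩, ⟨gw.toNat, gw.toNat + 1596⟩]
        v.mem s_11538e.mem := by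
      u_same
    have hbits : Bits (g.Blk A) g.len s_11538e.mem g.f := by
      apply hpt.bits_off hsame
      intro w hw
      simp only [List.mem_cons, List.mem_nil_iff, or_false] at hw
      rcases hw with rfl | rfl
      · exact Or.inl ⟨by simp only []; omega, by simp only []; omega⟩
      · exact Or.inr ⟨by simp only []; omega, by simp only []; omega⟩
    refine ⟨hpt.readerPre ?_ hun ?_ hbits, ?_⟩
    · rw [w_rsp]
      u_omega
    · rw [w_rdi]
      exact ef.symm
    · rw [Vorbis.Spec.bitsArg_def, w_rsi]
      decide
  case cont =>
    -- cut197: get_bits returned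
    v_after_call w_rsp_11538e w_mem_11538e
    simp only [w_rdi_11538e] at w_same
    have hpost : GetBitsSpecPost (g.Blk A) g.len (s_11538e.reg .rdi).toNat (bitsArg s_11538e) s_11538e s_11538er := w_post
    rw [w_rdi_11538e] at hpost
    have hsame : Mem.SameExcept
        [⟨(g.e.reg .rsp).toNat - 1840, (g.e.reg .rsp).toNat - 1480⟩, ⟨gw.toNat, gw.toNat + 1596⟩,
         ⟨(g.e.reg .rdi).toNat + 48, (g.e.reg .rdi).toNat + 56⟩, ⟨(g.e.reg .rdi).toNat + 84, (g.e.reg .rdi).toNat + 96⟩,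
         ⟨(g.e.reg .rdi).toNat + 136, (g.e.reg .rdi).toNat + 144⟩, ⟨(g.e.reg .rdi).toNat + 1484, (g.e.reg .rdi).toNat + 1749⟩,
         ⟨(g.e.reg .rdi).toNat + 1752, (g.e.reg .rdi).toNat + 1784⟩] v.mem s_11538er.mem := by
      u_same
    have hun : ShadowUntouched v.mem s_11538er.mem := by v_untouched
    have hpt' : Pt u₀ g i A5 A fc n s_11538er.mem := by
      apply hpt.carry hsame hun hpost.bits.bits
      intro w hw
      simp only [List.mem_cons, List.mem_nil_iff, or_false] at hw
      rcases hw with rfl | rfl | rfl | rfl | rfl | rfl | rfl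
      · exact Or.inl ⟨by simp only []; omega, by simp only []; omega⟩
      · exact Or.inr (Or.inr (Or.inr (Or.inr (Or.inr (Or.inr ⟨by simp only []; omega, by simp only []; omega⟩)))))
      · exact Or.inr (Or.inl ⟨by simp only []; omega, by simp only []; omega⟩)
      · exact Or.inr (Or.inr (Or.inl ⟨by simp only []; omega, by simp only []; omega⟩))
      · exact Or.inr (Or.inr (Or.inr (Or.inl ⟨by simp only []; omega, by simp only []; omega⟩)))
      · exact Or.inr (Or.inr (Or.inr (Or.inr (Or.inl ⟨by simp only []; omega, by simp only []; omega⟩))))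
      · exact Or.inr (Or.inr (Or.inr (Or.inr (Or.inr (Or.inl ⟨by simp only []; omega, by simp only []; omega⟩)))))
    refine ReachVia.done ?_
    refine ⟨hpt', w_rip, w_rsp, ?_, ?_, hgw, w_eq, w_inv⟩
    · rw [w_kept .rbp rfl]
      exact b_rbp
    · rw [w_kept .r12 rfl]
      exact b_r12

/-- **Step 3** (cut197 → cut198): the checked store `g->bark_map_size` (0x11539b, stb_vorbis_fixed.c:3973) of the result of the
previous `get_bits`, then `get_bits(f, 6)` (0x1153ae); the point is carried over both by `Pt.carry`. -/
theorem step3 (Lay : Layout) (hLay : Lay.hi = 0x1000000) (μ : Microarch) (hμ : UserX.MicroOK μ) (u₀ : State)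
    (hcode : HasCodeNat Lay u₀ Vorbis.L.start_decoder.entry Vorbis.Code.code_start_decoder.nat Vorbis.L.start_decoder.size)
    (h_get_bits : ∀ (others : List Obj) (frames : List (Nat × FrameLayout)) (Blk : Block → Prop) (len : Nat),
      Calls Lay μ Vorbis.WayInv (Vorbis.conv u₀) Vorbis.L.get_bits.entry (Vorbis.Spec.get_bits.spec others frames Blk len))
    (hstore2 : Asan.SmallCheck Lay μ Vorbis.WayInv (Vorbis.CodeOK u₀) [.rax, .rcx, .rdx] 2 Vorbis.L.__asan_store2_noabort.entry)
    (g : Ghost) (i : Nat) (A5 : Arena) (A : Arena × List Obj) (fc : Nat) (n : Int) (gw : Word) (v : State)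
    (hat : In3 u₀ g i A5 A fc n gw Vorbis.L.start_decoder.cut197 v) :
    ReachVia Lay μ WayInv v (In3 u₀ g i A5 A fc n gw Vorbis.L.start_decoder.cut198) := by
  have hgb := h_get_bits A.2 g.frames' (g.Blk A) g.len
  have hpt := hat.pt
  have he := hpt.entry
  v_entry he
  simp only [depth] at he_room he_stack
  obtain ⟨⟨r1, r2, r3, r4⟩, ⟨f1, f2, f3, f4⟩, ⟨c1, c2, c3, c4, c5⟩, c6⟩ := hpt.where_
  have eRA : g.RA = (g.e.reg .rsp).toNat := rfl
  have ef : g.f = (g.e.reg .rdi).toNat := rfl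
  have eR : g.R = (g.e.reg .rsp).toNat - 1480 := rfl
  have b_rip := hat.rip
  have b_rsp := hat.rsp
  have b_rbp := hat.rbp
  have b_r12 := hat.r12
  have hgw := hat.elem
  have w_eq : Mem.EqOn Vorbis.L.textLo Vorbis.L.textHi u₀.mem v.mem := hat.code
  have hdf : v.flags .df = false := (show abiInv _ from hat.inv).1
  have hmx : v.mxcsr &&& 0x1F80 = 0x1F80 := (show abiInv _ from hat.inv).2
  have hsse := Vorbis.sseOK_of_abiInv hat.inv
  u_walk hcode [hμ.vendor] until [Vorbis.L.start_decoder.cut198] span [Vorbis.L.textLo, Vorbis.L.textHi] side (v_side)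
  case check_11539b =>
    -- 0x11539b: 2 byte(s) at offset 4 of the floor element
    have hun : ShadowUntouched v.mem s_11539b.mem := by v_untouched
    exact hpt.acc_elem hun _ 2 (by decide) (by u_omega) (by u_omega)
  case call_inv =>
    v_inv
  case pre_1153ae =>
    -- 0x1153ae: the precondition of `get_bits(f, 6)`
    have hun : ShadowUntouched v.mem s_1153ae.mem := by v_untouched
    have hsame : Mem.SameExcept [⟨(g.e.reg .rsp).toNat - 1488, (g.e.reg .rsp).toNat - 1480⟩, ⟨gw.toNat, gw.toNat + 1596⟩]
        v.mem s_1153ae.mem := by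
      u_same
    have hbits : Bits (g.Blk A) g.len s_1153ae.mem g.f := by
      apply hpt.bits_off hsame
      intro w hw
      simp only [List.mem_cons, List.mem_nil_iff, or_false] at hw
      rcases hw with rfl | rfl
      · exact Or.inl ⟨by simp only []; omega, by simp only []; omega⟩
      · exact Or.inr ⟨by simp only []; omega, by simp only []; omega⟩
    refine ⟨hpt.readerPre ?_ hun ?_ hbits, ?_⟩
    · rw [w_rsp]
      u_omega
    · rw [w_rdi]
      exact ef.symm
    · rw [Vorbis.Spec.bitsArg_def, w_rsi]
      decide
  case cont =>
    -- cut198: get_bits returned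
    v_after_call w_rsp_1153ae w_mem_1153ae
    simp only [w_rdi_1153ae] at w_same
    have hpost : GetBitsSpecPost (g.Blk A) g.len (s_1153ae.reg .rdi).toNat (bitsArg s_1153ae) s_1153ae s_1153aer := w_post
    rw [w_rdi_1153ae] at hpost
    have hsame : Mem.SameExcept
        [⟨(g.e.reg .rsp).toNat - 1840, (g.e.reg .rsp).toNat - 1480⟩, ⟨gw.toNat, gw.toNat + 1596⟩,
         ⟨(g.e.reg .rdi).toNat + 48, (g.e.reg .rdi).toNat + 56⟩, ⟨(g.e.reg .rdi).toNat + 84, (g.e.reg .rdi).toNat + 96⟩,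
         ⟨(g.e.reg .rdi).toNat + 136, (g.e.reg .rdi).toNat + 144⟩, ⟨(g.e.reg .rdi).toNat + 1484, (g.e.reg .rdi).toNat + 1749⟩,
         ⟨(g.e.reg .rdi).toNat + 1752, (g.e.reg .rdi).toNat + 1784⟩] v.mem s_1153aer.mem := by
      u_same
    have hun : ShadowUntouched v.mem s_1153aer.mem := by v_untouched
    have hpt' : Pt u₀ g i A5 A fc n s_1153aer.mem := by
      apply hpt.carry hsame hun hpost.bits.bits
      intro w hw
      simp only [List.mem_cons, List.mem_nil_iff, or_false] at hw
      rcases hw with rfl | rfl | rfl | rfl | rfl | rfl | rfl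
      · exact Or.inl ⟨by simp only []; omega, by simp only []; omega⟩
      · exact Or.inr (Or.inr (Or.inr (Or.inr (Or.inr (Or.inr ⟨by simp only []; omega, by simp only []; omega⟩)))))
      · exact Or.inr (Or.inl ⟨by simp only []; omega, by simp only []; omega⟩)
      · exact Or.inr (Or.inr (Or.inl ⟨by simp only []; omega, by simp only []; omega⟩))
      · exact Or.inr (Or.inr (Or.inr (Or.inl ⟨by simp only []; omega, by simp only []; omega⟩)))
      · exact Or.inr (Or.inr (Or.inr (Or.inr (Or.inl ⟨by simp only []; omega, by simp only []; omega⟩))))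
      · exact Or.inr (Or.inr (Or.inr (Or.inr (Or.inr (Or.inl ⟨by simp only []; omega, by simp only []; omega⟩)))))
    refine ReachVia.done ?_
    refine ⟨hpt', w_rip, w_rsp, ?_, ?_, hgw, w_eq, w_inv⟩
    · rw [w_kept .rbp rfl]
      exact b_rbp
    · rw [w_kept .r12 rfl]
      exact b_r12

/-- **Step 4** (cut198 → cut199): the checked store `g->amplitude_bits` (0x1153bb, stb_vorbis_fixed.c:3974) of the result of the
previous `get_bits`, then `get_bits(f, 8)` (0x1153cd); the point is carried over both by `Pt.carry`. -/
theorem step4 (Lay : Layout) (hLay : Lay.hi = 0x1000000) (μ : Microarch) (hμ : UserX.MicroOK μ) (u₀ : State)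
    (hcode : HasCodeNat Lay u₀ Vorbis.L.start_decoder.entry Vorbis.Code.code_start_decoder.nat Vorbis.L.start_decoder.size)
    (h_get_bits : ∀ (others : List Obj) (frames : List (Nat × FrameLayout)) (Blk : Block → Prop) (len : Nat),
      Calls Lay μ Vorbis.WayInv (Vorbis.conv u₀) Vorbis.L.get_bits.entry (Vorbis.Spec.get_bits.spec others frames Blk len))
    (hstore1 : Asan.SmallCheck Lay μ Vorbis.WayInv (Vorbis.CodeOK u₀) [.rax, .rdx] 1 Vorbis.L.__asan_store1_noabort.entry)
    (g : Ghost) (i : Nat) (A5 : Arena) (A : Arena × List Obj) (fc : Nat) (n : Int) (gw : Word) (v : State)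
    (hat : In3 u₀ g i A5 A fc n gw Vorbis.L.start_decoder.cut198 v) :
    ReachVia Lay μ WayInv v (In3 u₀ g i A5 A fc n gw Vorbis.L.start_decoder.cut199) := by
  have hgb := h_get_bits A.2 g.frames' (g.Blk A) g.len
  have hpt := hat.pt
  have he := hpt.entry
  v_entry he
  simp only [depth] at he_room he_stack
  obtain ⟨⟨r1, r2, r3, r4⟩, ⟨f1, f2, f3, f4⟩, ⟨c1, c2, c3, c4, c5⟩, c6⟩ := hpt.where_
  have eRA : g.RA = (g.e.reg .rsp).toNat := rfl
  have ef : g.f = (g.e.reg .rdi).toNat := rfl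
  have eR : g.R = (g.e.reg .rsp).toNat - 1480 := rfl
  have b_rip := hat.rip
  have b_rsp := hat.rsp
  have b_rbp := hat.rbp
  have b_r12 := hat.r12
  have hgw := hat.elem
  have w_eq : Mem.EqOn Vorbis.L.textLo Vorbis.L.textHi u₀.mem v.mem := hat.code
  have hdf : v.flags .df = false := (show abiInv _ from hat.inv).1
  have hmx : v.mxcsr &&& 0x1F80 = 0x1F80 := (show abiInv _ from hat.inv).2
  have hsse := Vorbis.sseOK_of_abiInv hat.inv
  u_walk hcode [hμ.vendor] until [Vorbis.L.start_decoder.cut199] span [Vorbis.L.textLo, Vorbis.L.textHi] side (v_side)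
  case check_1153bb =>
    -- 0x1153bb: 1 byte(s) at offset 6 of the floor element
    have hun : ShadowUntouched v.mem s_1153bb.mem := by v_untouched
    exact hpt.acc_elem hun _ 1 (by decide) (by u_omega) (by u_omega)
  case call_inv =>
    v_inv
  case pre_1153cd =>
    -- 0x1153cd: the precondition of `get_bits(f, 8)`
    have hun : ShadowUntouched v.mem s_1153cd.mem := by v_untouched
    have hsame : Mem.SameExcept [⟨(g.e.reg .rsp).toNat - 1488, (g.e.reg .rsp).toNat - 1480⟩, ⟨gw.toNat, gw.toNat + 1596⟩]
        v.mem s_1153cd.mem := by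
      u_same
    have hbits : Bits (g.Blk A) g.len s_1153cd.mem g.f := by
      apply hpt.bits_off hsame
      intro w hw
      simp only [List.mem_cons, List.mem_nil_iff, or_false] at hw
      rcases hw with rfl | rfl
      · exact Or.inl ⟨by simp only []; omega, by simp only []; omega⟩
      · exact Or.inr ⟨by simp only []; omega, by simp only []; omega⟩
    refine ⟨hpt.readerPre ?_ hun ?_ hbits, ?_⟩
    · rw [w_rsp]
      u_omega
    · rw [w_rdi]
      exact ef.symm
    · rw [Vorbis.Spec.bitsArg_def, w_rsi]
      decide
  case cont =>
    -- cut199: get_bits returned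
    v_after_call w_rsp_1153cd w_mem_1153cd
    simp only [w_rdi_1153cd] at w_same
    have hpost : GetBitsSpecPost (g.Blk A) g.len (s_1153cd.reg .rdi).toNat (bitsArg s_1153cd) s_1153cd s_1153cdr := w_post
    rw [w_rdi_1153cd] at hpost
    have hsame : Mem.SameExcept
        [⟨(g.e.reg .rsp).toNat - 1840, (g.e.reg .rsp).toNat - 1480⟩, ⟨gw.toNat, gw.toNat + 1596⟩,
         ⟨(g.e.reg .rdi).toNat + 48, (g.e.reg .rdi).toNat + 56⟩, ⟨(g.e.reg .rdi).toNat + 84, (g.e.reg .rdi).toNat + 96⟩,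
         ⟨(g.e.reg .rdi).toNat + 136, (g.e.reg .rdi).toNat + 144⟩, ⟨(g.e.reg .rdi).toNat + 1484, (g.e.reg .rdi).toNat + 1749⟩,
         ⟨(g.e.reg .rdi).toNat + 1752, (g.e.reg .rdi).toNat + 1784⟩] v.mem s_1153cdr.mem := by
      u_same
    have hun : ShadowUntouched v.mem s_1153cdr.mem := by v_untouched
    have hpt' : Pt u₀ g i A5 A fc n s_1153cdr.mem := by
      apply hpt.carry hsame hun hpost.bits.bits
      intro w hw
      simp only [List.mem_cons, List.mem_nil_iff, or_false] at hw
      rcases hw with rfl | rfl | rfl | rfl | rfl | rfl | rfl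
      · exact Or.inl ⟨by simp only []; omega, by simp only []; omega⟩
      · exact Or.inr (Or.inr (Or.inr (Or.inr (Or.inr (Or.inr ⟨by simp only []; omega, by simp only []; omega⟩)))))
      · exact Or.inr (Or.inl ⟨by simp only []; omega, by simp only []; omega⟩)
      · exact Or.inr (Or.inr (Or.inl ⟨by simp only []; omega, by simp only []; omega⟩))
      · exact Or.inr (Or.inr (Or.inr (Or.inl ⟨by simp only []; omega, by simp only []; omega⟩)))
      · exact Or.inr (Or.inr (Or.inr (Or.inr (Or.inl ⟨by simp only []; omega, by simp only []; omega⟩))))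
      · exact Or.inr (Or.inr (Or.inr (Or.inr (Or.inr (Or.inl ⟨by simp only []; omega, by simp only []; omega⟩)))))
    refine ReachVia.done ?_
    refine ⟨hpt', w_rip, w_rsp, ?_, ?_, hgw, w_eq, w_inv⟩
    · rw [w_kept .rbp rfl]
      exact b_rbp
    · rw [w_kept .r12 rfl]
      exact b_r12

/-- **Step 5** (cut199 → cut200): the checked store `g->amplitude_offset` (0x1153da, stb_vorbis_fixed.c:3975) of the result of the
previous `get_bits`, then `get_bits(f, 4)` (0x1153ec); the point is carried over both by `Pt.carry`. -/
theorem step5 (Lay : Layout) (hLay : Lay.hi = 0x1000000) (μ : Microarch) (hμ : UserX.MicroOK μ) (u₀ : State)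
    (hcode : HasCodeNat Lay u₀ Vorbis.L.start_decoder.entry Vorbis.Code.code_start_decoder.nat Vorbis.L.start_decoder.size)
    (h_get_bits : ∀ (others : List Obj) (frames : List (Nat × FrameLayout)) (Blk : Block → Prop) (len : Nat),
      Calls Lay μ Vorbis.WayInv (Vorbis.conv u₀) Vorbis.L.get_bits.entry (Vorbis.Spec.get_bits.spec others frames Blk len))
    (hstore1 : Asan.SmallCheck Lay μ Vorbis.WayInv (Vorbis.CodeOK u₀) [.rax, .rdx] 1 Vorbis.L.__asan_store1_noabort.entry)
    (g : Ghost) (i : Nat) (A5 : Arena) (A : Arena × List Obj) (fc : Nat) (n : Int) (gw : Word) (v : State)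
    (hat : In3 u₀ g i A5 A fc n gw Vorbis.L.start_decoder.cut199 v) :
    ReachVia Lay μ WayInv v (In3 u₀ g i A5 A fc n gw Vorbis.L.start_decoder.cut200) := by
  have hgb := h_get_bits A.2 g.frames' (g.Blk A) g.len
  have hpt := hat.pt
  have he := hpt.entry
  v_entry he
  simp only [depth] at he_room he_stack
  obtain ⟨⟨r1, r2, r3, r4⟩, ⟨f1, f2, f3, f4⟩, ⟨c1, c2, c3, c4, c5⟩, c6⟩ := hpt.where_
  have eRA : g.RA = (g.e.reg .rsp).toNat := rfl
  have ef : g.f = (g.e.reg .rdi).toNat := rfl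
  have eR : g.R = (g.e.reg .rsp).toNat - 1480 := rfl
  have b_rip := hat.rip
  have b_rsp := hat.rsp
  have b_rbp := hat.rbp
  have b_r12 := hat.r12
  have hgw := hat.elem
  have w_eq : Mem.EqOn Vorbis.L.textLo Vorbis.L.textHi u₀.mem v.mem := hat.code
  have hdf : v.flags .df = false := (show abiInv _ from hat.inv).1
  have hmx : v.mxcsr &&& 0x1F80 = 0x1F80 := (show abiInv _ from hat.inv).2
  have hsse := Vorbis.sseOK_of_abiInv hat.inv
  u_walk hcode [hμ.vendor] until [Vorbis.L.start_decoder.cut200] span [Vorbis.L.textLo, Vorbis.L.textHi] side (v_side)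
  case check_1153da =>
    -- 0x1153da: 1 byte(s) at offset 7 of the floor element
    have hun : ShadowUntouched v.mem s_1153da.mem := by v_untouched
    exact hpt.acc_elem hun _ 1 (by decide) (by u_omega) (by u_omega)
  case call_inv =>
    v_inv
  case pre_1153ec =>
    -- 0x1153ec: the precondition of `get_bits(f, 4)`
    have hun : ShadowUntouched v.mem s_1153ec.mem := by v_untouched
    have hsame : Mem.SameExcept [⟨(g.e.reg .rsp).toNat - 1488, (g.e.reg .rsp).toNat - 1480⟩, ⟨gw.toNat, gw.toNat + 1596⟩]
        v.mem s_1153ec.mem := by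
      u_same
    have hbits : Bits (g.Blk A) g.len s_1153ec.mem g.f := by
      apply hpt.bits_off hsame
      intro w hw
      simp only [List.mem_cons, List.mem_nil_iff, or_false] at hw
      rcases hw with rfl | rfl
      · exact Or.inl ⟨by simp only []; omega, by simp only []; omega⟩
      · exact Or.inr ⟨by simp only []; omega, by simp only []; omega⟩
    refine ⟨hpt.readerPre ?_ hun ?_ hbits, ?_⟩
    · rw [w_rsp]
      u_omega
    · rw [w_rdi]
      exact ef.symm
    · rw [Vorbis.Spec.bitsArg_def, w_rsi]
      decide
  case cont =>
    -- cut200: get_bits returned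
    v_after_call w_rsp_1153ec w_mem_1153ec
    simp only [w_rdi_1153ec] at w_same
    have hpost : GetBitsSpecPost (g.Blk A) g.len (s_1153ec.reg .rdi).toNat (bitsArg s_1153ec) s_1153ec s_1153ecr := w_post
    rw [w_rdi_1153ec] at hpost
    have hsame : Mem.SameExcept
        [⟨(g.e.reg .rsp).toNat - 1840, (g.e.reg .rsp).toNat - 1480⟩, ⟨gw.toNat, gw.toNat + 1596⟩,
         ⟨(g.e.reg .rdi).toNat + 48, (g.e.reg .rdi).toNat + 56⟩, ⟨(g.e.reg .rdi).toNat + 84, (g.e.reg .rdi).toNat + 96⟩,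
         ⟨(g.e.reg .rdi).toNat + 136, (g.e.reg .rdi).toNat + 144⟩, ⟨(g.e.reg .rdi).toNat + 1484, (g.e.reg .rdi).toNat + 1749⟩,
         ⟨(g.e.reg .rdi).toNat + 1752, (g.e.reg .rdi).toNat + 1784⟩] v.mem s_1153ecr.mem := by
      u_same
    have hun : ShadowUntouched v.mem s_1153ecr.mem := by v_untouched
    have hpt' : Pt u₀ g i A5 A fc n s_1153ecr.mem := by
      apply hpt.carry hsame hun hpost.bits.bits
      intro w hw
      simp only [List.mem_cons, List.mem_nil_iff, or_false] at hw
      rcases hw with rfl | rfl | rfl | rfl | rfl | rfl | rfl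
      · exact Or.inl ⟨by simp only []; omega, by simp only []; omega⟩
      · exact Or.inr (Or.inr (Or.inr (Or.inr (Or.inr (Or.inr ⟨by simp only []; omega, by simp only []; omega⟩)))))
      · exact Or.inr (Or.inl ⟨by simp only []; omega, by simp only []; omega⟩)
      · exact Or.inr (Or.inr (Or.inl ⟨by simp only []; omega, by simp only []; omega⟩))
      · exact Or.inr (Or.inr (Or.inr (Or.inl ⟨by simp only []; omega, by simp only []; omega⟩)))
      · exact Or.inr (Or.inr (Or.inr (Or.inr (Or.inl ⟨by simp only []; omega, by simp only []; omega⟩))))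
      · exact Or.inr (Or.inr (Or.inr (Or.inr (Or.inr (Or.inl ⟨by simp only []; omega, by simp only []; omega⟩)))))
    refine ReachVia.done ?_
    refine ⟨hpt', w_rip, w_rsp, ?_, ?_, hgw, w_eq, w_inv⟩
    · rw [w_kept .rbp rfl]
      exact b_rbp
    · rw [w_kept .r12 rfl]
      exact b_r12

/-- **Step 6** (cut200 → cut201, the head of loop 3977 with `j = 0`): the checked store `g->number_of_books = get_bits(f,4) + 1`
(0x1153fa, stb_vorbis_fixed.c:3976), `mov ebx, [rsp+24H]` (Z24: gcc's literal 0). -/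
theorem step6 (Lay : Layout) (hLay : Lay.hi = 0x1000000) (μ : Microarch) (hμ : UserX.MicroOK μ) (u₀ : State)
    (hcode : HasCodeNat Lay u₀ Vorbis.L.start_decoder.entry Vorbis.Code.code_start_decoder.nat Vorbis.L.start_decoder.size)
    (hstore1 : Asan.SmallCheck Lay μ Vorbis.WayInv (Vorbis.CodeOK u₀) [.rax, .rdx] 1 Vorbis.L.__asan_store1_noabort.entry)
    (g : Ghost) (i : Nat) (A5 : Arena) (A : Arena × List Obj) (fc : Nat) (n : Int) (gw : Word) (v : State)
    (hat : In3 u₀ g i A5 A fc n gw Vorbis.L.start_decoder.cut200 v) :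
    ReachVia Lay μ WayInv v (In3L u₀ g i A5 A fc n gw 0 255 Vorbis.L.start_decoder.cut201) := by
  have hpt := hat.pt
  have he := hpt.entry
  v_entry he
  simp only [depth] at he_room he_stack
  obtain ⟨⟨r1, r2, r3, r4⟩, ⟨f1, f2, f3, f4⟩, ⟨c1, c2, c3, c4, c5⟩, c6⟩ := hpt.where_
  have eRA : g.RA = (g.e.reg .rsp).toNat := rfl
  have ef : g.f = (g.e.reg .rdi).toNat := rfl
  have eR : g.R = (g.e.reg .rsp).toNat - 1480 := rfl
  have b_rip := hat.rip
  have b_rsp := hat.rsp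
  have b_rbp := hat.rbp
  have b_r12 := hat.r12
  have hgw := hat.elem
  have w_eq : Mem.EqOn Vorbis.L.textLo Vorbis.L.textHi u₀.mem v.mem := hat.code
  have hdf : v.flags .df = false := (show abiInv _ from hat.inv).1
  have hmx : v.mxcsr &&& 0x1F80 = 0x1F80 := (show abiInv _ from hat.inv).2
  have hsse := Vorbis.sseOK_of_abiInv hat.inv
  -- Z24: the dword `[R + 24H]` is gcc's literal 0 (`j = 0`)
  have hz24 : v.mem.u32 (g.R + 0x24) = 0 := hpt.mid.consts.z24 (by omega) (by omega)
  have haddr : g.e.reg .rsp - 1444 = addr (g.R + 0x24) := eq_addr _ _ (by u_omega)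
  have hz : v.mem.readLE (g.e.reg .rsp - 1444) 4 = 0 := by
    rw [haddr]
    exact hz24
  u_walk hcode [hμ.vendor] until [Vorbis.L.start_decoder.cut201] span [Vorbis.L.textLo, Vorbis.L.textHi] side (v_side)
  case check_1153fa =>
    -- 0x1153fa: byte 8 of the floor element
    have hun : ShadowUntouched v.mem s_1153fa.mem := by v_untouched
    exact hpt.acc_elem hun _ 1 (by decide) (by u_omega) (by u_omega)
  case cont =>
    -- 0x115408 (cut201): the head of loop 3977 with `j = 0`
    have hsame : Mem.SameExcept [⟨(g.e.reg .rsp).toNat - 1488, (g.e.reg .rsp).toNat - 1480⟩, ⟨gw.toNat, gw.toNat + 1596⟩]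
        v.mem s_115404.mem := by
      u_same
    have hun : ShadowUntouched v.mem s_115404.mem := by v_untouched
    have hoff : ∀ w, w ∈ ([⟨(g.e.reg .rsp).toNat - 1488, (g.e.reg .rsp).toNat - 1480⟩, ⟨gw.toNat, gw.toNat + 1596⟩] : List Span) →
        WinOff g (fc + 1596 * i) w := by
      intro w hw
      simp only [List.mem_cons, List.mem_nil_iff, or_false] at hw
      rcases hw with rfl | rfl
      · exact Or.inl ⟨by simp only []; omega, by simp only []; omega⟩
      · exact Or.inr ⟨by simp only []; omega, by simp only []; omega⟩
    have hpt' : Pt u₀ g i A5 A fc n s_115404.mem :=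
      hpt.carry hsame hun (hpt.bits_off hsame hoff) (fun w hw => (hoff w hw).ok)
    refine ReachVia.done ?_
    refine ⟨⟨hpt', w_rip, w_rsp, ?_, ?_, hgw, w_eq, ?_⟩, ?_, Nat.zero_le _⟩
    · rw [w_kept .rbp rfl]
      exact b_rbp
    · rw [w_kept .r12 rfl]
      exact b_r12
    · v_inv
    · rw [w_rbx]
      rfl

/-- **Step 7** (the head of loop 3977, cut201 = 0x115408): the checked load of `g->number_of_books` (0x11540d), the test
`j < number_of_books`. Exit: `error(f, VORBIS_feature_not_supported)` (0x11544b, stb_vorbis_fixed.c:3979) and `jmp 113b22`: the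
epilogue with eax = 0 (`Pt.atERR`). Body: `get_bits(f, 8)` (0x115424) to cut202, with `j < number_of_books ≤ 255`. -/
theorem step7 (Lay : Layout) (hLay : Lay.hi = 0x1000000) (μ : Microarch) (hμ : UserX.MicroOK μ) (u₀ : State)
    (hcode : HasCodeNat Lay u₀ Vorbis.L.start_decoder.entry Vorbis.Code.code_start_decoder.nat Vorbis.L.start_decoder.size)
    (h_get_bits : ∀ (others : List Obj) (frames : List (Nat × FrameLayout)) (Blk : Block → Prop) (len : Nat),
      Calls Lay μ Vorbis.WayInv (Vorbis.conv u₀) Vorbis.L.get_bits.entry (Vorbis.Spec.get_bits.spec others frames Blk len))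
    (hload1 : Asan.SmallCheck Lay μ Vorbis.WayInv (Vorbis.CodeOK u₀) [.rax, .rdx] 1 Vorbis.L.__asan_load1_noabort.entry)
    (h_error : ∀ (others : List Obj) (frames : List (Nat × FrameLayout)),
      Calls Lay μ Vorbis.WayInv (Vorbis.conv u₀) Vorbis.L.error.entry (Vorbis.Spec.error.spec others frames))
    (g : Ghost) (i : Nat) (A5 : Arena) (A : Arena × List Obj) (fc : Nat) (n : Int) (gw : Word) (j : Nat) (v : State)
    (hat : In3L u₀ g i A5 A fc n gw j 255 Vorbis.L.start_decoder.cut201 v) :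
    ReachVia Lay μ WayInv v
      (fun w => AtERR u₀ g w ∨ In3L u₀ g i A5 A fc n gw j 254 Vorbis.L.start_decoder.cut202 w) := by
  have hgb := h_get_bits A.2 g.frames' (g.Blk A) g.len
  have herr := h_error A.2 g.frames'
  have hpt := hat.base.pt
  have he := hpt.entry
  v_entry he
  simp only [depth] at he_room he_stack
  obtain ⟨⟨r1, r2, r3, r4⟩, ⟨f1, f2, f3, f4⟩, ⟨c1, c2, c3, c4, c5⟩, c6⟩ := hpt.where_
  have eRA : g.RA = (g.e.reg .rsp).toNat := rfl
  have ef : g.f = (g.e.reg .rdi).toNat := rfl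
  have eR : g.R = (g.e.reg .rsp).toNat - 1480 := rfl
  have b_rip := hat.base.rip
  have b_rsp := hat.base.rsp
  have b_rbp := hat.base.rbp
  have b_r12 := hat.base.r12
  have hgw := hat.base.elem
  have w_eq : Mem.EqOn Vorbis.L.textLo Vorbis.L.textHi u₀.mem v.mem := hat.base.code
  have hdf : v.flags .df = false := (show abiInv _ from hat.base.inv).1
  have hmx : v.mxcsr &&& 0x1F80 = 0x1F80 := (show abiInv _ from hat.base.inv).2
  have hsse := Vorbis.sseOK_of_abiInv hat.base.inv
  have b_rbx := hat.rbx
  have hj := hat.jle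
  u_walk hcode [hμ.vendor] until [Vorbis.L.start_decoder.cut202, Vorbis.L.start_decoder.cut4] span [Vorbis.L.textLo, Vorbis.L.textHi] side (v_side)
  case check_11540d =>
    -- 0x11540d: byte 8 of the floor element
    have hun : ShadowUntouched v.mem s_11540d.mem := by v_untouched
    exact hpt.acc_elem hun _ 1 (by decide) (by u_omega) (by u_omega)
  case call_inv =>
    v_inv
  case pre_11544b =>
    -- 0x11544b: the precondition of `error(f, 4)`
    have hun : ShadowUntouched v.mem s_11544b.mem := by v_untouched
    refine hpt.errorPre ?_ hun ?_
    · rw [w_rsp]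
      u_omega
    · rw [w_rdi]
      exact ef.symm
  case call_inv =>
    v_inv
  case pre_115424 =>
    -- 0x115424: the precondition of `get_bits(f, 8)`
    have hun : ShadowUntouched v.mem s_115424.mem := by v_untouched
    have hsame : Mem.SameExcept [⟨(g.e.reg .rsp).toNat - 1488, (g.e.reg .rsp).toNat - 1480⟩, ⟨gw.toNat, gw.toNat + 1596⟩]
        v.mem s_115424.mem := by
      u_same
    have hbits : Bits (g.Blk A) g.len s_115424.mem g.f := by
      apply hpt.bits_off hsame
      intro w hw
      simp only [List.mem_cons, List.mem_nil_iff, or_false] at hw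
      rcases hw with rfl | rfl
      · exact Or.inl ⟨by simp only []; omega, by simp only []; omega⟩
      · exact Or.inr ⟨by simp only []; omega, by simp only []; omega⟩
    refine ⟨hpt.readerPre ?_ hun ?_ hbits, ?_⟩
    · rw [w_rsp]
      u_omega
    · rw [w_rdi]
      exact ef.symm
    · rw [Vorbis.Spec.bitsArg_def, w_rsi]
      decide
  case cont =>
    -- 0x115450 (cut203): `error` returned eax = 0; `jmp 113b22`
    v_after_call w_rsp_11544b w_mem_11544b
    simp only [w_rdi_11544b] at w_same
    have hpost := w_post
    have hsame : Mem.SameExcept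
        [⟨(g.e.reg .rsp).toNat - 1840, (g.e.reg .rsp).toNat - 1480⟩,
         ⟨(g.e.reg .rdi).toNat + 136, (g.e.reg .rdi).toNat + 144⟩] v.mem s_11544br.mem := by
      u_same
    have hun : ShadowUntouched v.mem s_11544br.mem := by v_untouched
    have hws : ∀ w, w ∈ ([⟨(g.e.reg .rsp).toNat - 1840, (g.e.reg .rsp).toNat - 1480⟩,
         ⟨(g.e.reg .rdi).toNat + 136, (g.e.reg .rdi).toNat + 144⟩] : List Span) →
        (g.RA - 1888 ≤ w.lo ∧ w.hi ≤ g.R) ∨ (g.f + 136 ≤ w.lo ∧ w.hi ≤ g.f + 144) := by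
      intro w hw
      simp only [List.mem_cons, List.mem_nil_iff, or_false] at hw
      rcases hw with rfl | rfl
      · exact Or.inl ⟨by simp only []; omega, by simp only []; omega⟩
      · exact Or.inr ⟨by simp only []; omega, by simp only []; omega⟩
    have hpt' : Pt u₀ g i A5 A fc n s_11544br.mem := by
      apply hpt.carry hsame hun (hpt.bits_err hsame hws)
      intro w hw
      rcases hws w hw with k | k
      · exact Or.inl k
      · exact Or.inr (Or.inr (Or.inr (Or.inl k)))
    have w_rax : s_11544br.reg .rax = 0 := hpost.1
    u_walk hcode [hμ.vendor] until [Vorbis.L.start_decoder.cut4] span [Vorbis.L.textLo, Vorbis.L.textHi] side (v_side)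
    refine ReachVia.done (Or.inl ?_)
    refine hpt'.atERR w_mem w_rip w_rsp w_eq ?_ ?_
    · v_inv
    · rw [w_rax]
      rfl
  case cont =>
    -- 0x115429 (cut202): get_bits returned, inside the loop body
    v_after_call w_rsp_115424 w_mem_115424
    simp only [w_rdi_115424] at w_same
    have hpost : GetBitsSpecPost (g.Blk A) g.len (s_115424.reg .rdi).toNat (bitsArg s_115424) s_115424 s_115424r := w_post
    rw [w_rdi_115424] at hpost
    have hsame : Mem.SameExcept
        [⟨(g.e.reg .rsp).toNat - 1840, (g.e.reg .rsp).toNat - 1480⟩, ⟨gw.toNat, gw.toNat + 1596⟩,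
         ⟨(g.e.reg .rdi).toNat + 48, (g.e.reg .rdi).toNat + 56⟩, ⟨(g.e.reg .rdi).toNat + 84, (g.e.reg .rdi).toNat + 96⟩,
         ⟨(g.e.reg .rdi).toNat + 136, (g.e.reg .rdi).toNat + 144⟩, ⟨(g.e.reg .rdi).toNat + 1484, (g.e.reg .rdi).toNat + 1749⟩,
         ⟨(g.e.reg .rdi).toNat + 1752, (g.e.reg .rdi).toNat + 1784⟩] v.mem s_115424r.mem := by
      u_same
    have hun : ShadowUntouched v.mem s_115424r.mem := by v_untouched
    have hpt' : Pt u₀ g i A5 A fc n s_115424r.mem := by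
      apply hpt.carry hsame hun hpost.bits.bits
      intro w hw
      simp only [List.mem_cons, List.mem_nil_iff, or_false] at hw
      rcases hw with rfl | rfl | rfl | rfl | rfl | rfl | rfl
      · exact Or.inl ⟨by simp only []; omega, by simp only []; omega⟩
      · exact Or.inr (Or.inr (Or.inr (Or.inr (Or.inr (Or.inr ⟨by simp only []; omega, by simp only []; omega⟩)))))
      · exact Or.inr (Or.inl ⟨by simp only []; omega, by simp only []; omega⟩)
      · exact Or.inr (Or.inr (Or.inl ⟨by simp only []; omega, by simp only []; omega⟩))
      · exact Or.inr (Or.inr (Or.inr (Or.inl ⟨by simp only []; omega, by simp only []; omega⟩)))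
      · exact Or.inr (Or.inr (Or.inr (Or.inr (Or.inl ⟨by simp only []; omega, by simp only []; omega⟩))))
      · exact Or.inr (Or.inr (Or.inr (Or.inr (Or.inr (Or.inl ⟨by simp only []; omega, by simp only []; omega⟩)))))
    refine ReachVia.done (Or.inr ?_)
    refine ⟨⟨hpt', w_rip, w_rsp, ?_, ?_, hgw, w_eq, w_inv⟩, ?_, counter_lt _ j hj hbr_11541a⟩
    · rw [w_kept .rbp rfl]
      exact b_rbp
    · rw [w_kept .r12 rfl]
      exact b_r12
    · rw [w_kept .rbx rfl]
      exact b_rbx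

/-- **Step 8** (cut202 → the head cut201 with `j + 1`): the checked store `g->book_list[j] = get_bits(f,8)` (0x115434,
stb_vorbis_fixed.c:3978) at byte `9 + j ≤ 263` of the floor element, `add ebx, 1`, the back edge. -/
theorem step8 (Lay : Layout) (hLay : Lay.hi = 0x1000000) (μ : Microarch) (hμ : UserX.MicroOK μ) (u₀ : State)
    (hcode : HasCodeNat Lay u₀ Vorbis.L.start_decoder.entry Vorbis.Code.code_start_decoder.nat Vorbis.L.start_decoder.size)
    (hstore1 : Asan.SmallCheck Lay μ Vorbis.WayInv (Vorbis.CodeOK u₀) [.rax, .rdx] 1 Vorbis.L.__asan_store1_noabort.entry)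
    (g : Ghost) (i : Nat) (A5 : Arena) (A : Arena × List Obj) (fc : Nat) (n : Int) (gw : Word) (j : Nat) (v : State)
    (hat : In3L u₀ g i A5 A fc n gw j 254 Vorbis.L.start_decoder.cut202 v) :
    ReachVia Lay μ WayInv v (In3L u₀ g i A5 A fc n gw (j + 1) 255 Vorbis.L.start_decoder.cut201) := by
  have hpt := hat.base.pt
  have he := hpt.entry
  v_entry he
  simp only [depth] at he_room he_stack
  obtain ⟨⟨r1, r2, r3, r4⟩, ⟨f1, f2, f3, f4⟩, ⟨c1, c2, c3, c4, c5⟩, c6⟩ := hpt.where_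
  have eRA : g.RA = (g.e.reg .rsp).toNat := rfl
  have ef : g.f = (g.e.reg .rdi).toNat := rfl
  have eR : g.R = (g.e.reg .rsp).toNat - 1480 := rfl
  have b_rip := hat.base.rip
  have b_rsp := hat.base.rsp
  have b_rbp := hat.base.rbp
  have b_r12 := hat.base.r12
  have hgw := hat.base.elem
  have w_eq : Mem.EqOn Vorbis.L.textLo Vorbis.L.textHi u₀.mem v.mem := hat.base.code
  have hdf : v.flags .df = false := (show abiInv _ from hat.base.inv).1
  have hmx : v.mxcsr &&& 0x1F80 = 0x1F80 := (show abiInv _ from hat.base.inv).2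
  have hsse := Vorbis.sseOK_of_abiInv hat.base.inv
  have b_rbx := hat.rbx
  have hj := hat.jle
  -- `movsxd r14, ebx` is `j`
  have hsx := sext_counter j (by omega)
  u_walk hcode [hμ.vendor] until [Vorbis.L.start_decoder.cut201] span [Vorbis.L.textLo, Vorbis.L.textHi] side (v_side)
  case check_115434 =>
    -- 0x115434: byte `9 + j` of the floor element
    have hun : ShadowUntouched v.mem s_115434.mem := by v_untouched
    generalize Word.ofBV (BitVec.signExtend 64 (Word.part Width.w32 (UInt64.ofNat j))) = jw at hsx ⊢
    exact hpt.acc_elem hun _ 1 (by decide) (by u_omega) (by u_omega)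
  case cont =>
    -- 0x115408 (cut201): the head again, with `j + 1`
    generalize Word.ofBV (BitVec.signExtend 64 (Word.part Width.w32 (UInt64.ofNat j))) = jw at *
    have hsame : Mem.SameExcept [⟨(g.e.reg .rsp).toNat - 1488, (g.e.reg .rsp).toNat - 1480⟩, ⟨gw.toNat, gw.toNat + 1596⟩]
        v.mem s_115441.mem := by
      u_same
    have hun : ShadowUntouched v.mem s_115441.mem := by v_untouched
    have hoff : ∀ w, w ∈ ([⟨(g.e.reg .rsp).toNat - 1488, (g.e.reg .rsp).toNat - 1480⟩, ⟨gw.toNat, gw.toNat + 1596⟩] : List Span) →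
        WinOff g (fc + 1596 * i) w := by
      intro w hw
      simp only [List.mem_cons, List.mem_nil_iff, or_false] at hw
      rcases hw with rfl | rfl
      · exact Or.inl ⟨by simp only []; omega, by simp only []; omega⟩
      · exact Or.inr ⟨by simp only []; omega, by simp only []; omega⟩
    have hpt' : Pt u₀ g i A5 A fc n s_115441.mem :=
      hpt.carry hsame hun (hpt.bits_off hsame hoff) (fun w hw => (hoff w hw).ok)
    refine ReachVia.done ?_
    refine ⟨⟨hpt', w_rip, w_rsp, ?_, ?_, hgw, w_eq, ?_⟩, ?_, by omega⟩
    · rw [w_kept .rbp rfl]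
      exact b_rbp
    · rw [w_kept .r12 rfl]
      exact b_r12
    · v_inv
    · rw [w_rbx]
      exact counter_succ j hj

/-- **Loop 3977** (`for (j = 0; j < g->number_of_books; ++j) g->book_list[j] = get_bits(f,8);` then the error exit): from the head
`cut201` with any `j ≤ 255` the run reaches the epilogue. `ReachVia.loop` with the measure `256 − ebx`: every round that comes back
to the head has `j < number_of_books ≤ 255` (a byte), so `j + 1 ≤ 255`. -/
theorem loop3977 (Lay : Layout) (hLay : Lay.hi = 0x1000000) (μ : Microarch) (hμ : UserX.MicroOK μ) (u₀ : State)
    (hcode : HasCodeNat Lay u₀ Vorbis.L.start_decoder.entry Vorbis.Code.code_start_decoder.nat Vorbis.L.start_decoder.size)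
    (h_get_bits : ∀ (others : List Obj) (frames : List (Nat × FrameLayout)) (Blk : Block → Prop) (len : Nat),
      Calls Lay μ Vorbis.WayInv (Vorbis.conv u₀) Vorbis.L.get_bits.entry (Vorbis.Spec.get_bits.spec others frames Blk len))
    (hstore1 : Asan.SmallCheck Lay μ Vorbis.WayInv (Vorbis.CodeOK u₀) [.rax, .rdx] 1 Vorbis.L.__asan_store1_noabort.entry)
    (hload1 : Asan.SmallCheck Lay μ Vorbis.WayInv (Vorbis.CodeOK u₀) [.rax, .rdx] 1 Vorbis.L.__asan_load1_noabort.entry)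
    (h_error : ∀ (others : List Obj) (frames : List (Nat × FrameLayout)),
      Calls Lay μ Vorbis.WayInv (Vorbis.conv u₀) Vorbis.L.error.entry (Vorbis.Spec.error.spec others frames))
    (g : Ghost) (i : Nat) (A5 : Arena) (A : Arena × List Obj) (fc : Nat) (n : Int) (gw : Word) (v : State)
    (hinv : ∃ j, In3L u₀ g i A5 A fc n gw j 255 Vorbis.L.start_decoder.cut201 v) :
    ReachVia Lay μ WayInv v (fun w => AtERR u₀ g w) := by
  refine ReachVia.loop (Inv := fun s => ∃ j, In3L u₀ g i A5 A fc n gw j 255 Vorbis.L.start_decoder.cut201 s)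
    (fun s => 256 - (s.reg .rbx).toNat) ?_ v hinv
  intro s hs
  obtain ⟨j, hj⟩ := hs
  -- the head: exit through `error`, or the body's `get_bits`
  refine (step7 Lay hLay μ hμ u₀ hcode h_get_bits hload1 h_error g i A5 A fc n gw j s hj).trans ?_
  intro w hw
  rcases hw with herr | hbody
  · exact ReachVia.done (Or.inl herr)
  · -- the body's store and the back edge
    refine (step8 Lay hLay μ hμ u₀ hcode hstore1 g i A5 A fc n gw j w hbody).mono ?_
    intro w' hw'
    refine Or.inr ⟨⟨j + 1, hw'⟩, ?_⟩
    have h1 : (w'.reg .rbx).toNat = j + 1 := by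
      rw [hw'.rbx, UInt64.toNat_ofNat']
      have := hw'.jle
      omega
    have h2 : (s.reg .rbx).toNat = j := by
      rw [hj.rbx, UInt64.toNat_ofNat']
      have := hj.jle
      omega
    have h3 := hw'.jle
    show 256 - (w'.reg .rbx).toNat < 256 - (s.reg .rbx).toNat
    omega

end Vorbis.Spec.start_decoder_F3

/-- Segment F3 of `start_decoder` (a floor of type 0: 0x11532b – 0x115450): the steps chained by `ReachVia.trans`. -/
theorem Vorbis.Spec.Worked.start_decoder_F3_ok : Vorbis.Spec.start_decoder_F3.Statement := by
  unfold Vorbis.Spec.start_decoder_F3.Statement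
  intro Lay hLay μ hμ u₀ hcode hload8 h_get_bits hstore1 hstore2 hload1 h_error
  intro g i v hat
  obtain ⟨A5, A, hbody⟩ := hat
  -- cut194 → cut195
  refine (Vorbis.Spec.start_decoder_F3.step0 Lay hLay μ hμ u₀ hcode hload8 h_get_bits g i A5 A v hbody).trans ?_
  intro v1 h1
  obtain ⟨fc, n, gw, h1⟩ := h1
  -- the six fields: cut195 → … → cut200
  refine (Vorbis.Spec.start_decoder_F3.step1 Lay hLay μ hμ u₀ hcode h_get_bits hstore1 g i A5 A fc n gw v1 h1).trans ?_
  intro v2 h2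
  refine (Vorbis.Spec.start_decoder_F3.step2 Lay hLay μ hμ u₀ hcode h_get_bits hstore2 g i A5 A fc n gw v2 h2).trans ?_
  intro v3 h3
  refine (Vorbis.Spec.start_decoder_F3.step3 Lay hLay μ hμ u₀ hcode h_get_bits hstore2 g i A5 A fc n gw v3 h3).trans ?_
  intro v4 h4
  refine (Vorbis.Spec.start_decoder_F3.step4 Lay hLay μ hμ u₀ hcode h_get_bits hstore1 g i A5 A fc n gw v4 h4).trans ?_
  intro v5 h5
  refine (Vorbis.Spec.start_decoder_F3.step5 Lay hLay μ hμ u₀ hcode h_get_bits hstore1 g i A5 A fc n gw v5 h5).trans ?_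
  intro v6 h6
  -- `number_of_books`, `j = 0`: the head of loop 3977
  refine (Vorbis.Spec.start_decoder_F3.step6 Lay hLay μ hμ u₀ hcode hstore1 g i A5 A fc n gw v6 h6).trans ?_
  intro v7 h7
  -- the loop, and the error exit
  exact Vorbis.Spec.start_decoder_F3.loop3977 Lay hLay μ hμ u₀ hcode h_get_bits hstore1 hload1 h_error g i A5 A fc n gw v7
    ⟨0, h7⟩
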